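-- pv_equiv track=rewrite | github.com/StanfordHCI/pcstravelingsalesman | pcs-travelingsalesman.py | create_costs
-- ===== SOURCE A (Python) =====
-- def create_costs(conflicts):
--     costs = list()
--     for paper1 in conflicts.keys():
--         paper1_distances = list()
--         for paper2 in conflicts.keys():
--             paper1_conflicts = set(conflicts[paper1])
--             paper2_conflicts = set(conflicts[paper2])
--             difference = paper1_conflicts.symmetric_difference(paper2_conflicts)
--             cost = 0
--             if len(difference) > 0:
--                 cost = len(difference)#1
--
--             paper1_distances.append(cost)
--         costs.append(paper1_distances)
--     return costs
-- ===== SOURCE B (Python) =====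
-- def create_costs(conflicts):
--     sets = [set(v) for v in conflicts.values()]
--     n = len(sets)
--     rows = []
--     for i in range(n):
--         si = sets[i]
--         row = [rows[j][i] for j in range(i)]   # mirror the already-computed lower part
--         row.append(0)                          # diagonal: A symdiff A is empty
--         for j in range(i + 1, n):
--             row.append(len(si ^ sets[j]))
--         rows.append(row)
--     return rows
-- ===== Notes on version B (the rewrite author's own statement) =====
-- stated objective: faster
-- what changed: B precomputes each paper's conflict set once from the dict values and builds the matrix in a single indexed pass that computes each symmetric-difference size only for j>i, mirrors it from the already-built rows for j<i and writes 0 on the diagonal, instead of A's full n-by-n double scan that rebuilds both sets and the symmetric difference for every ordered pair; intended as faster, measured ~3.6x at n=1024 (both exceed the probe's timeout at n=4096, so the probe records it as unconfirmed).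
import Mathlib
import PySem

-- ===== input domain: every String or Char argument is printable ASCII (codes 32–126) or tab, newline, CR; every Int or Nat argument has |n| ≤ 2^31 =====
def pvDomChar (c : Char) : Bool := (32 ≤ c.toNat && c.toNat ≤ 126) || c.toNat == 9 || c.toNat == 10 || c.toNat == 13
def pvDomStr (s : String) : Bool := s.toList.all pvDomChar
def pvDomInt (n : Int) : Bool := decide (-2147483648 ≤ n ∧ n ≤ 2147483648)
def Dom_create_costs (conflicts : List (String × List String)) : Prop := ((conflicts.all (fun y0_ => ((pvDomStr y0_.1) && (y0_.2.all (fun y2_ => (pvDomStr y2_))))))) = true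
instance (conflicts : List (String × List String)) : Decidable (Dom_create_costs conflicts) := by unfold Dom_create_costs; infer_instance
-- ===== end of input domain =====

-- B precomputes each conflict set once and builds the matrix in one indexed pass, mirroring
-- the already-computed lower triangle instead of recomputing it (intended as faster; a timing run measured ~3.6x at n=1024).

-- ===== PORT A =====
-- conflicts is a Python dict; the assoc-list argument is materialised as a PySem.Dict
-- (duplicate keys overwrite, like dict(...)). conflicts[paper1] with paper1 drawn from
-- d.keys never raises, so getD is exact here.
def create_costs (conflicts : List (String × List String)) : List (List Int) :=
  let d := PySem.Dict.ofList conflicts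
  d.keys.foldl (fun costs paper1 =>
    let paper1_distances := d.keys.foldl (fun row paper2 =>
      let paper1_conflicts := PySem.Set.ofList (d.getD paper1 [])
      let paper2_conflicts := PySem.Set.ofList (d.getD paper2 [])
      let difference := PySem.Set.symmDiff paper1_conflicts paper2_conflicts
      let cost : Int := if PySem.Set.len difference > 0 then PySem.Set.len difference else 0
      row ++ [cost]) []
    costs ++ [paper1_distances]) []

-- ===== PORT B =====
def pvSymCost (a b : PySem.Set String) : Int := PySem.Set.len (PySem.Set.symmDiff a b)

-- Source B's indexing sets[i], sets[j], rows[j][i] is always in range, so List.getD is exact here;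
-- range(i+1, n) is ported as List.range' (i+1) (n-(i+1)); the two inner append loops are maps.
def create_costs_alt (conflicts : List (String × List String)) : List (List Int) :=
  let d := PySem.Dict.ofList conflicts
  let sets := d.values.map (fun v => PySem.Set.ofList v)
  let n := sets.length
  (List.range n).foldl (fun rows i =>
    let si := sets.getD i []
    let row := ((List.range i).map (fun j => (rows.getD j []).getD i 0))
      ++ [(0 : Int)]
      ++ ((List.range' (i+1) (n-(i+1))).map (fun j => pvSymCost si (sets.getD j [])))
    rows ++ [row]) []

-- ===== PRECONDITION & SPEC =====
def Spec_create_costs (conflicts : List (String × List String)) (out : List (List Int)) : Prop := out = create_costs_alt conflicts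
instance (conflicts : List (String × List String)) (out : List (List Int)) : Decidable (Spec_create_costs conflicts out) := by unfold Spec_create_costs; infer_instance

-- ===== CLAIM (what is proved, stated in full; the proofs are below) =====
def Claim_equal_create_costs : Prop := ∀ (conflicts : List (String × List String)), Dom_create_costs conflicts → Spec_create_costs conflicts (create_costs conflicts)

-- ===== LEMMAS AND PROOFS =====

-- entry (i,j) of the matrix, and row i of the matrix, over a list of sets
def pvC (sets : List (PySem.Set String)) (i j : Nat) : Int :=
  pvSymCost (sets.getD i []) (sets.getD j [])

def pvRowM (sets : List (PySem.Set String)) (i : Nat) : List Int :=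
  (List.range sets.length).map (fun j => pvC sets i j)

-- the append-accumulator loop is a map
theorem pv_foldl_snoc {α β : Type} (f : α → β) : ∀ (xs : List α) (init : List β),
    xs.foldl (fun acc x => acc ++ [f x]) init = init ++ xs.map f := by
  intro xs
  induction xs with
  | nil => simp
  | cons x xs ih => intro init; simp [List.foldl_cons, ih]

theorem pv_cost_if (a b : PySem.Set String) :
    (if PySem.Set.len (PySem.Set.symmDiff a b) > 0 then PySem.Set.len (PySem.Set.symmDiff a b) else 0)
      = pvSymCost a b := by
  have h : 0 ≤ PySem.Set.len (PySem.Set.symmDiff a b) := by simp [PySem.Set.len]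
  unfold pvSymCost
  split_ifs with hp
  · rfl
  · omega

theorem pv_symCost_self (a : PySem.Set String) : pvSymCost a a = 0 := by
  simp [pvSymCost, PySem.Set.symmDiff, PySem.Set.diff, PySem.Set.len,
    List.filter_eq_nil_iff, PySem.Set.contains]

theorem pv_symCost_comm (a b : PySem.Set String) : pvSymCost a b = pvSymCost b a := by
  simp [pvSymCost, PySem.Set.symmDiff, PySem.Set.len]
  omega

-- mapping a function over a list = mapping over its indices
theorem pv_map_getD_range {α β : Type} [Inhabited α] (dflt : α) (f : α → β) :
    ∀ xs : List α, (List.range xs.length).map (fun i => f (xs.getD i dflt)) = xs.map f := by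
  intro xs
  induction xs with
  | nil => simp
  | cons x xs ih =>
      simp only [List.length_cons, List.range_succ_eq_map, List.map_cons, List.map_map]
      simp only [List.getD_cons_zero]
      refine congrArg _ ?_
      calc (List.range xs.length).map ((fun i => f ((x :: xs).getD i dflt)) ∘ (· + 1))
          = (List.range xs.length).map (fun i => f (xs.getD i dflt)) := by
            refine List.map_congr_left (fun i _ => ?_)
            simp
        _ = xs.map f := ih

-- loop invariant of B's single pass: after i iterations the first i matrix rows are built
theorem pv_B_inv (sets : List (PySem.Set String)) :
    ∀ k : Nat, k ≤ sets.length →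
      (List.range k).foldl (fun rows i =>
          let si := sets.getD i []
          let row := ((List.range i).map (fun j => (rows.getD j []).getD i 0))
            ++ [(0 : Int)]
            ++ ((List.range' (i+1) (sets.length-(i+1))).map (fun j => pvSymCost si (sets.getD j [])))
          rows ++ [row]) []
        = (List.range k).map (fun i => pvRowM sets i) := by
  intro k
  induction k with
  | zero => intro _; simp
  | succ k ih =>
      intro hk
      have hkn : k < sets.length := hk
      rw [List.range_succ, List.foldl_append, List.foldl_cons, List.foldl_nil,
        ih (Nat.le_of_lt hkn), List.map_append, List.map_cons, List.map_nil]
      refine congrArg _ ?_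
      refine congrArg (fun r => [r]) ?_
      -- the row built at index k is matrix row k
      have hlen : ((List.range k).map (fun i => pvRowM sets i)).length = k := by simp
      have hpref : (List.range k).map
            (fun j => (((List.range k).map (fun i => pvRowM sets i)).getD j []).getD k 0)
          = (List.range k).map (fun j => pvC sets k j) := by
        refine List.map_congr_left (fun j hj => ?_)
        have hjk : j < k := List.mem_range.mp hj
        have h1 : ((List.range k).map (fun i => pvRowM sets i)).getD j [] = pvRowM sets j := by
          rw [List.getD_eq_getElem?_getD, List.getElem?_eq_getElem (by simpa using hjk)]
          simp
        rw [h1]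
        have h2 : (pvRowM sets j).getD k 0 = pvC sets j k := by
          unfold pvRowM
          rw [List.getD_eq_getElem?_getD, List.getElem?_eq_getElem (by simpa using hkn)]
          simp
        rw [h2]
        exact pv_symCost_comm _ _
      rw [hpref]
      have hdiag : [(0 : Int)] = [pvC sets k k] := by
        rw [pvC, pv_symCost_self]
      rw [hdiag]
      -- assemble: range n = range k ++ [k] ++ range' (k+1) (n-(k+1))
      unfold pvRowM
      have hsplit : List.range sets.length
          = (List.range k ++ [k]) ++ List.range' (k+1) (sets.length-(k+1)) := by
        have h1 : sets.length = (k+1) + (sets.length-(k+1)) := by omega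
        rw [h1, List.range_add, List.range_succ, List.range'_eq_map_range, Nat.add_sub_cancel_left]
      rw [hsplit, List.map_append, List.map_append, List.map_cons, List.map_nil]
      simp only [pvC, List.append_assoc]

-- ===== VERDICT (by name: the statement is the Claim_ definition above) =====
theorem create_costs_spec : Claim_equal_create_costs := by
  intro conflicts _
  unfold Spec_create_costs create_costs create_costs_alt
  dsimp only
  set d := PySem.Dict.ofList conflicts with hd
  set sets := d.values.map (fun v => PySem.Set.ofList v) with hsets
  have hnd : d.keys.Nodup := PySem.Dict.nodup_keys_ofList conflicts
  have hvals : sets = d.keys.map (fun k => PySem.Set.ofList (d.getD k [])) := by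
    rw [hsets, PySem.Dict.values_eq_map_keys d hnd ([] : List String), List.map_map]
    rfl
  -- B's side: the single pass yields the full matrix over `sets`
  rw [pv_B_inv sets sets.length (Nat.le_refl _)]
  -- A's side: the nested append loops are nested maps
  rw [pv_foldl_snoc]
  simp only [List.nil_append]
  -- both equal sets.map (fun a => sets.map (pvSymCost a))
  have hB : (List.range sets.length).map (fun i => pvRowM sets i)
      = sets.map (fun a => sets.map (fun b => pvSymCost a b)) := by
    rw [← pv_map_getD_range ([] : PySem.Set String)
      (fun a => sets.map (fun b => pvSymCost a b)) sets]
    refine List.map_congr_left (fun i _ => ?_)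
    unfold pvRowM
    rw [← pv_map_getD_range ([] : PySem.Set String)
      (fun b => pvSymCost (sets.getD i []) b) sets]
    rfl
  rw [hB, hvals, List.map_map]
  refine List.map_congr_left (fun p1 _ => ?_)
  rw [pv_foldl_snoc]
  simp only [List.nil_append, List.map_map, Function.comp]
  exact List.map_congr_left (fun p2 _ => pv_cost_if _ _)
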